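-- pv_equiv track=rewrite | github.com/AlecCooper/ShakespeareTranslator | clean.py | word_embed
-- ===== SOURCE A (Python) =====
-- def word_embed(lines, vocab, rev_vocab, map_int):
--
--     # the list of embedded lines
--     embedded = []
--
--     # loop through every line and embedd
--     for line in lines:
--
--         # the integerized tokens are stored in this list
--         new_line = []
--
--         for token in line:
--
--             # If the token is already included in the vocab,
--             # we can map it to an integer
--             if token in vocab:
--                 new_line.append(vocab[token])
--
--             # If the token is not in the vocab, we map it to a
--             # new integer
--             else:
--                 # Create new mapping
--                 vocab[token] = map_int
--                 rev_vocab[map_int] = token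
--
--                 new_line.append(map_int)
--                 map_int += 1
--
--         embedded.append(new_line)
--
--     return embedded, vocab, rev_vocab, map_int
-- ===== SOURCE B (Python) =====
-- def word_embed(lines, vocab, rev_vocab, map_int):
--     # Pass 1: build the vocabulary in first-appearance order
--     for line in lines:
--         for token in line:
--             if token not in vocab:
--                 vocab[token] = map_int
--                 rev_vocab[map_int] = token
--                 map_int += 1
--     # Pass 2: pure translation with the complete vocab
--     embedded = [[vocab[token] for token in line] for line in lines]
--     return embedded, vocab, rev_vocab, map_int
-- ===== Notes on version B (the rewrite author's own statement) =====
-- stated objective: alternative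
-- what changed: A builds each embedded line while mutating the vocab in one interleaved pass; B first builds the complete vocab in a separate indexing pass and then translates all lines in a second pure pass.
import Mathlib
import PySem

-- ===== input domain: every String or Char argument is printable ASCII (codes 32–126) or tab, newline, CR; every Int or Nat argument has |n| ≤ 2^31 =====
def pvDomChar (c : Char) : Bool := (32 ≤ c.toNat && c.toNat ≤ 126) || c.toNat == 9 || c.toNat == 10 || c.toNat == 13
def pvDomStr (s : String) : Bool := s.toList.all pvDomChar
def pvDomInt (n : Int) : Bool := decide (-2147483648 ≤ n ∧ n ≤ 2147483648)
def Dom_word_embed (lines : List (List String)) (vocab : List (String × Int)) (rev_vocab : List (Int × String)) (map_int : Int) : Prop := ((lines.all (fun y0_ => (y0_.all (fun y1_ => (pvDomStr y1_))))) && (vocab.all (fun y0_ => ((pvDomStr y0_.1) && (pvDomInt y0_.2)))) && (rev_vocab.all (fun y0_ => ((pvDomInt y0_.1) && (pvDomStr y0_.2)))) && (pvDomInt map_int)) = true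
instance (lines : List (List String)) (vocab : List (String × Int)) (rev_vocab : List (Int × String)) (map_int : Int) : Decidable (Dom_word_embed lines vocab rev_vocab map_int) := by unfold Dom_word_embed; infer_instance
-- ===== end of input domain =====

-- B replaces A's single interleaved pass (mutate vocab while emitting ints) by an
-- indexing pass that completes the vocab, then a second pure translation pass (alternative decomposition).
-- A mutates vocab/rev_vocab in place; B performs the same mutations (same inserts in the same order).


-- ===== PORT A =====
-- one token of A's inner loop: emit the existing mapping, or create a new one and emit it
def weTokA (acc : List Int × PySem.Dict String Int × PySem.Dict Int String × Int) (token : String) :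
    List Int × PySem.Dict String Int × PySem.Dict Int String × Int :=
  if acc.2.1.contains token then
    (acc.1 ++ [(acc.2.1.get? token).getD 0], acc.2.1, acc.2.2.1, acc.2.2.2)
  else
    (acc.1 ++ [acc.2.2.2], acc.2.1.insert token acc.2.2.2, acc.2.2.1.insert acc.2.2.2 token, acc.2.2.2 + 1)

-- one line of A's outer loop
def weLineA (acc : List (List Int) × PySem.Dict String Int × PySem.Dict Int String × Int)
    (line : List String) :
    List (List Int) × PySem.Dict String Int × PySem.Dict Int String × Int :=
  let inner := line.foldl weTokA (([] : List Int), acc.2.1, acc.2.2.1, acc.2.2.2)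
  (acc.1 ++ [inner.1], inner.2.1, inner.2.2.1, inner.2.2.2)

def word_embed (lines : List (List String)) (vocab : List (String × Int)) (rev_vocab : List (Int × String)) (map_int : Int) : List (List Int) × (List (String × Int)) × (List (Int × String)) × Int :=
  let r := lines.foldl weLineA
    (([] : List (List Int)), PySem.Dict.ofList vocab, PySem.Dict.ofList rev_vocab, map_int)
  (r.1, r.2.1.items, r.2.2.1.items, r.2.2.2)

-- ===== PORT B =====
-- pass-1 step: register token if unseen (no output emitted)
def weBuildTok (st : PySem.Dict String Int × PySem.Dict Int String × Int) (token : String) :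
    PySem.Dict String Int × PySem.Dict Int String × Int :=
  if st.1.contains token then st
  else (st.1.insert token st.2.2, st.2.1.insert st.2.2 token, st.2.2 + 1)

def word_embed_alt (lines : List (List String)) (vocab : List (String × Int)) (rev_vocab : List (Int × String)) (map_int : Int) : List (List Int) × (List (String × Int)) × (List (Int × String)) × Int :=
  let st := lines.foldl (fun s line => line.foldl weBuildTok s)
    (PySem.Dict.ofList vocab, PySem.Dict.ofList rev_vocab, map_int)
  let embedded := lines.map (fun line => line.map (fun token => (st.1.get? token).getD 0))
  (embedded, st.1.items, st.2.1.items, st.2.2)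

-- ===== PRECONDITION & SPEC =====
def Spec_word_embed (lines : List (List String)) (vocab : List (String × Int)) (rev_vocab : List (Int × String)) (map_int : Int) (out : List (List Int) × (List (String × Int)) × (List (Int × String)) × Int) : Prop := out = word_embed_alt lines vocab rev_vocab map_int
instance (lines : List (List String)) (vocab : List (String × Int)) (rev_vocab : List (Int × String)) (map_int : Int) (out : List (List Int) × (List (String × Int)) × (List (Int × String)) × Int) : Decidable (Spec_word_embed lines vocab rev_vocab map_int out) := by unfold Spec_word_embed; infer_instance

-- ===== CLAIM (what is proved, stated in full; the proofs are below) =====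
def Claim_equal_word_embed : Prop := ∀ (lines : List (List String)) (vocab : List (String × Int)) (rev_vocab : List (Int × String)) (map_int : Int), Dom_word_embed lines vocab rev_vocab map_int → Spec_word_embed lines vocab rev_vocab map_int (word_embed lines vocab rev_vocab map_int)

-- ===== LEMMAS AND PROOFS =====

-- a mapping, once present, survives one build step
theorem get?_weBuildTok_mono (st : PySem.Dict String Int × PySem.Dict Int String × Int)
    (tok t : String) (i : Int) (h : st.1.get? t = some i) :
    (weBuildTok st tok).1.get? t = some i := by
  by_cases hc : st.1.contains tok
  · simp [weBuildTok, hc, h]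
  · have hne : t ≠ tok := by
      intro he; subst he
      rw [PySem.Dict.contains_eq_isSome_get?, h] at hc
      simp at hc
    simp [weBuildTok, hc]
    rw [PySem.Dict.get?_insert_of_ne st.1 st.2.2 hne]
    exact h

-- … and survives the build of a whole line
theorem get?_buildLine_mono (line : List String)
    (st : PySem.Dict String Int × PySem.Dict Int String × Int)
    (t : String) (i : Int) (h : st.1.get? t = some i) :
    (line.foldl weBuildTok st).1.get? t = some i := by
  induction line generalizing st with
  | nil => exact h
  | cons tok rest ih => exact ih _ (get?_weBuildTok_mono st tok t i h)

-- … and survives the build of all remaining lines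
theorem get?_buildLines_mono (L : List (List String))
    (st : PySem.Dict String Int × PySem.Dict Int String × Int)
    (t : String) (i : Int) (h : st.1.get? t = some i) :
    (L.foldl (fun s line => line.foldl weBuildTok s) st).1.get? t = some i := by
  induction L generalizing st with
  | nil => exact h
  | cons line rest ih => exact ih _ (get?_buildLine_mono line st t i h)

-- every token of a line is mapped after building that line
theorem get?_buildLine_isSome (line : List String)
    (st : PySem.Dict String Int × PySem.Dict Int String × Int)
    (t : String) (ht : t ∈ line) :
    ∃ i, (line.foldl weBuildTok st).1.get? t = some i := by
  induction line generalizing st with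
  | nil => cases ht
  | cons tok rest ih =>
    rcases List.mem_cons.mp ht with he | hm
    · subst he
      have : ∃ i, (weBuildTok st t).1.get? t = some i := by
        by_cases hc : st.1.contains t
        · rw [PySem.Dict.contains_eq_isSome_get?] at hc
          rcases Option.isSome_iff_exists.mp hc with ⟨i, hi⟩
          exact ⟨i, by simp [weBuildTok, PySem.Dict.contains_eq_isSome_get?, hi]⟩
        · exact ⟨st.2.2, by simp [weBuildTok, hc, PySem.Dict.get?_insert_self]⟩
      rcases this with ⟨i, hi⟩
      exact ⟨i, by simpa using get?_buildLine_mono rest _ t i hi⟩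
    · exact ih _ hm

-- A's inner loop over a line = the emitted values (readable off the line's build) plus the built state
theorem weTokA_line (line : List String) (nl : List Int)
    (st : PySem.Dict String Int × PySem.Dict Int String × Int) :
    line.foldl weTokA (nl, st) =
      (nl ++ line.map (fun t => (((line.foldl weBuildTok st).1).get? t).getD 0),
       line.foldl weBuildTok st) := by
  induction line generalizing nl st with
  | nil => simp
  | cons tok rest ih =>
    by_cases hc : st.1.contains tok
    · rw [PySem.Dict.contains_eq_isSome_get?] at hc
      rcases Option.isSome_iff_exists.mp hc with ⟨i, hi⟩
      have hstep : weTokA (nl, st) tok = (nl ++ [i], st) := by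
        simp [weTokA, PySem.Dict.contains_eq_isSome_get?, hi]
      have hbuild : weBuildTok st tok = st := by
        simp [weBuildTok, PySem.Dict.contains_eq_isSome_get?, hi]
      have hfin : ((rest.foldl weBuildTok st).1.get? tok).getD 0 = i := by
        rw [get?_buildLine_mono rest st tok i hi]; rfl
      simp only [List.foldl_cons, hstep, hbuild, ih, List.map_cons, hfin]
      simp
    · have hstep : weTokA (nl, st) tok =
          (nl ++ [st.2.2], st.1.insert tok st.2.2, st.2.1.insert st.2.2 tok, st.2.2 + 1) := by
        simp [weTokA, hc]
      have hbuild : weBuildTok st tok =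
          (st.1.insert tok st.2.2, st.2.1.insert st.2.2 tok, st.2.2 + 1) := by
        simp [weBuildTok, hc]
      have hi : (st.1.insert tok st.2.2, st.2.1.insert st.2.2 tok, st.2.2 + 1).1.get? tok
          = some st.2.2 := PySem.Dict.get?_insert_self _ _ _
      have hfin : ((rest.foldl weBuildTok (st.1.insert tok st.2.2, st.2.1.insert st.2.2 tok, st.2.2 + 1)).1.get? tok).getD 0 = st.2.2 := by
        rw [get?_buildLine_mono rest _ tok st.2.2 hi]; rfl
      simp only [List.foldl_cons, hstep, hbuild, ih, List.map_cons, hfin]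
      simp

-- A's outer loop = B's build of all lines, with every line translated through the FINAL state
theorem weLineA_lines (L : List (List String)) (emb : List (List Int))
    (st : PySem.Dict String Int × PySem.Dict Int String × Int) :
    L.foldl weLineA (emb, st) =
      (emb ++ L.map (fun line => line.map (fun t =>
          (((L.foldl (fun s l => l.foldl weBuildTok s) st).1).get? t).getD 0)),
       L.foldl (fun s l => l.foldl weBuildTok s) st) := by
  induction L generalizing emb st with
  | nil => simp
  | cons line rest ih =>
    have hline : weLineA (emb, st) line =
        (emb ++ [line.map (fun t => (((line.foldl weBuildTok st).1).get? t).getD 0)],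
         line.foldl weBuildTok st) := by
      simp only [weLineA, weTokA_line line [] st, List.nil_append]
    have hmap : line.map (fun t => (((line.foldl weBuildTok st).1).get? t).getD 0)
        = line.map (fun t =>
            (((rest.foldl (fun s l => l.foldl weBuildTok s) (line.foldl weBuildTok st)).1).get? t).getD 0) := by
      apply List.map_congr_left
      intro t ht
      rcases get?_buildLine_isSome line st t ht with ⟨i, hi⟩
      rw [hi, get?_buildLines_mono rest _ t i hi]
    simp only [List.foldl_cons, hline, ih, List.map_cons, hmap, List.append_assoc,
      List.singleton_append]

-- ===== VERDICT (by name: the statement is the Claim_ definition above) =====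
theorem word_embed_spec : Claim_equal_word_embed := by
  intro lines vocab rev_vocab map_int _
  unfold Spec_word_embed word_embed word_embed_alt
  rw [weLineA_lines]
  simp
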